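-- pv_equiv track=rewrite | github.com/germanrud/python-algo-1 | practica8.py | obtener_palabra
-- ===== SOURCE A (Python) =====
-- def pertenece(s:list[int],x:int) -> bool:
--     estado:bool = False
--     for i in range(len(s)):
--         if s[i] == x:
--             estado = True
--     return estado
--
-- def obtener_palabra(s:str) -> str:
--     palabra:str = ""
--     j:int  = 0
--     if pertenece(s," "):
--         while s[j] != " " and j<len(s):
--             palabra = palabra + s[j]
--             j +=1
--     else:
--         return s
--     return palabra
-- ===== SOURCE B (Python) =====
-- def obtener_palabra(s: str) -> str:
--     # locate-then-slice: prefix before the first space (whole string if none)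
--     return s.partition(" ")[0]
-- ===== Notes on version B (the rewrite author's own statement) =====
-- stated objective: simpler
-- what changed: Replaces the membership pre-scan plus character-accumulating while loop with a single locate-and-slice via str.partition.
import Mathlib
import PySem

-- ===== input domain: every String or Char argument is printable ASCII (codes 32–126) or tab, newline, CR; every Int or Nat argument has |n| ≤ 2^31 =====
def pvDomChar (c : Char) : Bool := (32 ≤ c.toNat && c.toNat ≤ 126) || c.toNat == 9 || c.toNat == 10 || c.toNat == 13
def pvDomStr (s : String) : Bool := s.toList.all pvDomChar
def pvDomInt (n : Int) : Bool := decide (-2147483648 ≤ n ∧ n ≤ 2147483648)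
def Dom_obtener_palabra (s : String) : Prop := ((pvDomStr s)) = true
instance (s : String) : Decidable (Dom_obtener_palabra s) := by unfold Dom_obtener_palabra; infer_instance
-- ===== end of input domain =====

-- B replaces A's membership pre-scan + character-accumulating while loop with a single
-- locate-and-slice (str.partition); return value only, no side effects in either version.

-- ===== PORT A =====
-- pertenece: scans every position, setting a flag on a match
def pertenece (l : List Char) (x : Char) : Bool :=
  l.foldl (fun estado c => if c == x then true else estado) false

-- the while loop 'while s[j] != " " and j < len(s): palabra += s[j]; j += 1',
-- walking the characters from index j upward and accumulating into palabra
def obtenerLoop (cs : List Char) (palabra : List Char) : List Char :=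
  match cs with
  | [] => palabra
  | c :: rest => if c == ' ' then palabra else obtenerLoop rest (palabra ++ [c])

def obtener_palabra (s : String) : String :=
  if pertenece s.toList ' ' then String.ofList (obtenerLoop s.toList []) else s

-- ===== PORT B =====
-- s.partition(" ")[0]: the prefix of s before the first space (s itself if no space)
def obtener_palabra_alt (s : String) : String :=
  String.ofList (s.toList.takeWhile (fun c => c != ' '))

-- ===== PRECONDITION & SPEC =====
def Spec_obtener_palabra (s : String) (out : String) : Prop := out = obtener_palabra_alt s
instance (s : String) (out : String) : Decidable (Spec_obtener_palabra s out) := by unfold Spec_obtener_palabra; infer_instance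

-- ===== CLAIM (what is proved, stated in full; the proofs are below) =====
def Claim_equal_obtener_palabra : Prop := ∀ (s : String), Dom_obtener_palabra s → Spec_obtener_palabra s (obtener_palabra s)

-- ===== LEMMAS AND PROOFS =====
theorem obtenerLoop_eq_takeWhile (cs acc : List Char) :
    obtenerLoop cs acc = acc ++ cs.takeWhile (fun c => c != ' ') := by
  induction cs generalizing acc with
  | nil => simp [obtenerLoop]
  | cons c rest ih =>
    by_cases h : c = ' '
    · simp [obtenerLoop, h]
    · simp [obtenerLoop, h, ih]

theorem pertenece_false_no_mem (cs : List Char) (x : Char)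
    (h : pertenece cs x = false) : x ∉ cs := by
  have key : ∀ (l : List Char) (st : Bool),
      l.foldl (fun estado c => if c == x then true else estado) st = (st || l.any (fun c => c == x)) := by
    intro l
    induction l with
    | nil => simp
    | cons c rest ih =>
      intro st
      simp only [List.foldl_cons, List.any_cons]
      rw [ih]
      rcases Bool.eq_false_or_eq_true (c == x) with hc | hc <;> simp [hc]
  unfold pertenece at h
  rw [key cs false] at h
  simp at h
  intro hm
  exact absurd rfl (h x hm)

theorem takeWhile_all_of_no_mem (cs : List Char) (h : ' ' ∉ cs) :
    cs.takeWhile (fun c => c != ' ') = cs := by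
  apply List.takeWhile_eq_self_iff.mpr
  intro c hc
  simp
  intro he
  exact h (he ▸ hc)

-- ===== VERDICT (by name: the statement is the Claim_ definition above) =====
theorem obtener_palabra_spec : Claim_equal_obtener_palabra := by
  intro s _
  unfold Spec_obtener_palabra obtener_palabra obtener_palabra_alt
  by_cases h : pertenece s.toList ' ' = true
  · simp [h, obtenerLoop_eq_takeWhile]
  · have hf : pertenece s.toList ' ' = false := by simpa using h
    rw [if_neg h, takeWhile_all_of_no_mem s.toList (pertenece_false_no_mem _ _ hf)]
    simp [String.ofList]
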